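-- pv_equiv track=rewrite | github.com/rani-ukamble/python_coding | a37.py | sms_encoding_detailed
-- ===== SOURCE A (Python) =====
-- def sms_encoding_detailed(s):
--     vowels = "aeiouAEIOU"
--     l = s.split()
--     ans = []
--
--     for word in l:
--         # If the word contains only vowels, keep it as is
--         isVowel = True
--         for letter in word:
--             if letter not in vowels:
--                 isVowel = False
--                 break
--         if isVowel:
--             ans.append(word)
--         else:
--             encode = ""
--             for letter in word:
--                 if letter not in vowels:
--                     encode += letter
--             ans.append(encode)
--     return ' '.join(ans)
-- ===== SOURCE B (Python) =====
-- def sms_encoding_detailed(s):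
--     vowels = "aeiouAEIOU"
--     pieces = []   # characters of the final result
--     word = []     # characters of the word being scanned
--     cons = []     # its non-vowel characters
--
--     def flush():
--         if word:
--             if pieces:
--                 pieces.append(' ')
--             pieces.extend(cons if cons else word)
--             word.clear()
--             cons.clear()
--
--     for c in s:
--         if c.isspace():
--             flush()
--         else:
--             word.append(c)
--             if c not in vowels:
--                 cons.append(c)
--     flush()
--     return ''.join(pieces)
-- ===== Notes on version B (the rewrite author's own statement) =====
-- stated objective: alternative
-- what changed: B is a single character-level streaming pass over the raw string with a small state machine (current word, its consonants, output buffer) flushed at whitespace, instead of A's split() into a word list followed by two per-word scans and a final join.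
import Mathlib
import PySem

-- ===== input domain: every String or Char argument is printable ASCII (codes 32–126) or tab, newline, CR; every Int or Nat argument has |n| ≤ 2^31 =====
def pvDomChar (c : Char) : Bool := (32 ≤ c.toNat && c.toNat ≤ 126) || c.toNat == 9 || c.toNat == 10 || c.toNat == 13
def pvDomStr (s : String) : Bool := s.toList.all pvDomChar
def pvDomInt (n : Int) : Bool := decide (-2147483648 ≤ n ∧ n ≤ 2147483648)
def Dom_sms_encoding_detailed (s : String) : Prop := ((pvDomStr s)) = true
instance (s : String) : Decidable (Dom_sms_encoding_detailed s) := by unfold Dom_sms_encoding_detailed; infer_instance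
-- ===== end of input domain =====

-- B replaces A's split() into a word list plus two per-word scans and a final join by one
-- character-level streaming pass with a small state machine flushed at whitespace.  Objective: alternative.

-- ===== PORT A =====
def pvVowelsA : List Char := "aeiouAEIOU".toList

-- A's inner predicate loop with its early break: 'for letter in word: if letter not in vowels: isVowel=False; break'
def pvIsVowelLoop : List Char → Bool
  | [] => true
  | c :: rest => if c ∉ pvVowelsA then false else pvIsVowelLoop rest

-- A's encode loop: 'encode = ""; for letter in word: if letter not in vowels: encode += letter'
def pvEncodeLoop (w : List Char) : List Char :=
  w.foldl (fun acc c => if c ∉ pvVowelsA then acc ++ [c] else acc) []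

def sms_encoding_detailed (s : String) : String :=
  let l := PySem.Str.split₀ s
  let ans := l.foldl (fun ans word =>
    if pvIsVowelLoop word.toList then ans ++ [word]
    else ans ++ [String.ofList (pvEncodeLoop word.toList)]) []
  PySem.Str.join " " ans

-- ===== PORT B =====
-- B's flush(): emit the pending word (its consonants, or the word itself if it had none),
-- preceded by a space when output already exists; no-op on an empty pending word.
def pvFlush (pieces word cons : List Char) : List Char :=
  if word = [] then pieces
  else (if pieces = [] then pieces else pieces ++ [' ']) ++ (if cons = [] then word else cons)

-- B's character loop: 'for c in s: if c.isspace(): flush() else: word.append(c); if c not in vowels: cons.append(c)'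
def pvScan : List Char → List Char → List Char → List Char → List Char
  | [], pieces, word, cons => pvFlush pieces word cons
  | c :: rest, pieces, word, cons =>
      if PySem.Chars.isspace c then pvScan rest (pvFlush pieces word cons) [] []
      else pvScan rest pieces (word ++ [c]) (if c ∈ pvVowelsA then cons else cons ++ [c])

def sms_encoding_detailed_alt (s : String) : String :=
  String.ofList (pvScan s.toList [] [] [])

-- ===== PRECONDITION & SPEC =====
def Spec_sms_encoding_detailed (s : String) (out : String) : Prop := out = sms_encoding_detailed_alt s
instance (s : String) (out : String) : Decidable (Spec_sms_encoding_detailed s out) := by unfold Spec_sms_encoding_detailed; infer_instance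

-- ===== CLAIM (what is proved, stated in full; the proofs are below) =====
def Claim_equal_sms_encoding_detailed : Prop := ∀ (s : String), Dom_sms_encoding_detailed s → Spec_sms_encoding_detailed s (sms_encoding_detailed s)

-- ===== LEMMAS AND PROOFS =====

-- consonant predicate and A's per-word transformation, on char lists
def pvP (c : Char) : Bool := decide (c ∉ pvVowelsA)

def pvG (w : List Char) : List Char :=
  if w.filter pvP = [] then w else w.filter pvP

-- space-joined, pvG-transformed rendering of a word list
def pvJ (ws : List (List Char)) : List Char :=
  PySem.Chars.join [' '] (ws.map pvG)

theorem pvIsVowelLoop_iff_filter_nil (w : List Char) :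
    pvIsVowelLoop w = true ↔ w.filter pvP = [] := by
  induction w with
  | nil => simp [pvIsVowelLoop]
  | cons c rest ih =>
    by_cases h : c ∈ pvVowelsA <;> simp [pvIsVowelLoop, pvP, h, ih]

theorem pvEncodeLoop_eq_filter (w : List Char) :
    pvEncodeLoop w = w.filter pvP := by
  unfold pvEncodeLoop
  rw [PySem.List.foldl_append_ite_eq_filter]
  rw [List.nil_append]
  rfl

theorem pvG_ne_nil {w : List Char} (hw : w ≠ []) : pvG w ≠ [] := by
  unfold pvG; split
  · exact hw
  · assumption

theorem pvJ_nil : pvJ [] = [] := rfl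

theorem pvJ_singleton (w : List Char) : pvJ [w] = pvG w :=
  PySem.Chars.join_singleton [' '] (pvG w)

theorem pvJ_cons_cons (u v : List Char) (rest : List (List Char)) :
    pvJ (u :: v :: rest) = pvG u ++ [' '] ++ pvJ (v :: rest) :=
  PySem.Chars.join_cons_cons [' '] (pvG u) (pvG v) (rest.map pvG)

theorem pvJ_ne_nil {ws : List (List Char)} (hne : ws ≠ []) (hws : ∀ u ∈ ws, u ≠ []) :
    pvJ ws ≠ [] := by
  match ws with
  | [] => exact absurd rfl hne
  | [u] =>
    rw [pvJ_singleton]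
    exact pvG_ne_nil (hws u (by simp))
  | u :: v :: rest =>
    rw [pvJ_cons_cons]; simp

theorem pvJ_append (ws : List (List Char)) (w : List Char) (hne : ws ≠ []) :
    pvJ (ws ++ [w]) = pvJ ws ++ [' '] ++ pvG w := by
  induction ws with
  | nil => exact absurd rfl hne
  | cons u us ih =>
    match us with
    | [] =>
      show pvJ [u, w] = pvJ [u] ++ [' '] ++ pvG w
      rw [pvJ_cons_cons u w [], pvJ_singleton, pvJ_singleton]
    | v :: vs =>
      have ih' := ih (by simp)
      simp only [List.cons_append] at ih' ⊢
      rw [pvJ_cons_cons u v (vs ++ [w]), ih', pvJ_cons_cons u v vs]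
      simp [List.append_assoc]

-- flushing the pending word = appending it (transformed) to the joined output
theorem pvFlush_eq (ws : List (List Char)) (w : List Char)
    (hws : ∀ u ∈ ws, u ≠ []) (hw : w ≠ []) :
    pvFlush (pvJ ws) w (w.filter pvP) = pvJ (ws ++ [w]) := by
  unfold pvFlush
  rw [if_neg hw]
  by_cases hne : ws = []
  · subst hne
    rw [pvJ_nil, if_pos rfl, List.nil_append]
    simp only [List.nil_append]
    rw [pvJ_singleton]
    rfl
  · rw [if_neg (pvJ_ne_nil hne hws), pvJ_append ws w hne]
    rfl

-- main invariant: the streaming machine tracks split-then-transform-then-join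
theorem pvMain (cs : List Char) :
    ∀ (word : List Char) (ws : List (List Char)), (∀ u ∈ ws, u ≠ []) →
      pvScan cs (pvJ ws) word (word.filter pvP) =
        pvJ (PySem.Chars.split₀.go cs word.reverse ws.reverse) := by
  induction cs with
  | nil =>
    intro word ws hws
    show pvFlush (pvJ ws) word (word.filter pvP) = _
    unfold PySem.Chars.split₀.go
    by_cases hw : word = []
    · subst hw
      simp [pvFlush]
    · rw [if_neg (by simpa using hw)]
      rw [pvFlush_eq ws word hws hw]
      congr 1
      simp
  | cons c rest ih =>
    intro word ws hws
    show (if PySem.Chars.isspace c then _ else _) = _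
    unfold PySem.Chars.split₀.go
    by_cases hs : PySem.Chars.isspace c
    · rw [if_pos hs, if_pos hs]
      by_cases hw : word = []
      · subst hw
        rw [if_pos (by simp)]
        simpa using ih [] ws hws
      · rw [if_neg (by simpa using hw)]
        rw [pvFlush_eq ws word hws hw]
        have hacc : (word.reverse.reverse :: ws.reverse) = (ws ++ [word]).reverse := by simp
        rw [hacc]
        have := ih [] (ws ++ [word]) (by
          intro u hu
          rcases List.mem_append.mp hu with h | h
          · exact hws u h
          · rw [List.mem_singleton] at h; subst h; exact hw)
        simpa using this
    · rw [if_neg hs, if_neg hs]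
      have hcons : (if c ∈ pvVowelsA then word.filter pvP else word.filter pvP ++ [c]) =
          (word ++ [c]).filter pvP := by
        rw [List.filter_append]
        by_cases hc : c ∈ pvVowelsA <;> simp [pvP, hc]
      rw [hcons]
      have hrev : c :: word.reverse = (word ++ [c]).reverse := by simp
      rw [hrev]
      exact ih (word ++ [c]) ws hws

-- A's result, rewritten word-list-wise
theorem pvA_eq (s : String) :
    sms_encoding_detailed s = String.ofList (pvJ (PySem.Chars.split₀ s.toList)) := by
  show PySem.Str.join " " ((PySem.Str.split₀ s).foldl (fun ans word =>
      if pvIsVowelLoop word.toList then ans ++ [word]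
      else ans ++ [String.ofList (pvEncodeLoop word.toList)]) []) = _
  rw [show (fun (ans : List String) (word : String) =>
        if pvIsVowelLoop word.toList then ans ++ [word]
        else ans ++ [String.ofList (pvEncodeLoop word.toList)]) =
      (fun ans word => ans ++ [if pvIsVowelLoop word.toList then word
        else String.ofList (pvEncodeLoop word.toList)]) from by
    funext ans word; split <;> rfl]
  rw [PySem.List.foldl_append_singleton_eq_map]
  simp only [List.nil_append]
  unfold PySem.Str.join pvJ
  congr 1
  rw [show (" " : String).toList = [' '] from rfl]
  congr 1
  rw [List.map_map, ← PySem.Str.split₀_map_toList s, List.map_map]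
  refine List.map_congr_left ?_
  intro w _
  simp only [Function.comp]
  by_cases h : pvIsVowelLoop w.toList = true
  · have hf : w.toList.filter pvP = [] := (pvIsVowelLoop_iff_filter_nil _).mp h
    simp [h, pvG, hf]
  · have hf : ¬ w.toList.filter pvP = [] := fun hf =>
      h ((pvIsVowelLoop_iff_filter_nil _).mpr hf)
    simp [h, pvG, hf, pvEncodeLoop_eq_filter]

-- ===== VERDICT (by name: the statement is the Claim_ definition above) =====
theorem sms_encoding_detailed_spec : Claim_equal_sms_encoding_detailed := by
  intro s _
  unfold Spec_sms_encoding_detailed sms_encoding_detailed_alt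
  rw [pvA_eq]
  congr 1
  have := pvMain s.toList [] [] (by simp)
  simpa [pvJ, PySem.Chars.join, PySem.Chars.split₀] using this.symm
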